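-- pv_equiv track=rewrite | github.com/4ka0/QA-checker | refnums.py | refnum_identify
-- ===== SOURCE A (Python) =====
-- def refnum_identify(substring):
--     '''
--     Function for identifying substrings that contain at least one letter
--     and at least one number. These are treated as reference numbers.
--     '''
--     letter_present = False
--     number_present = False
--     for letter in substring:
--         if letter.isalpha():
--             letter_present = True
--         if letter.isdigit():
--             number_present = True
--     if letter_present and number_present:
--         return True
--     else:
--         return False
-- ===== SOURCE B (Python) =====
-- def refnum_identify(substring):
--     '''Divide-and-conquer: recursively split the string in half and merge
--     (letter_seen, digit_seen) pairs, cutting off once both are found.'''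
--     def scan(s):
--         if len(s) <= 1:
--             return (s.isalpha(), s.isdigit()) if s else (False, False)
--         mid = len(s) // 2
--         l1, d1 = scan(s[:mid])
--         if l1 and d1:
--             return (True, True)
--         l2, d2 = scan(s[mid:])
--         return (l1 or l2, d1 or d2)
--     l, d = scan(substring)
--     return l and d
-- ===== Notes on version B (the rewrite author's own statement) =====
-- stated objective: alternative
-- what changed: Replaced the single left-to-right loop maintaining two flags with a divide-and-conquer recursion that splits the string in half, recursively computes (letter_seen, digit_seen) for each half and merges with or, short-cutting once both are found.
import Mathlib
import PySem

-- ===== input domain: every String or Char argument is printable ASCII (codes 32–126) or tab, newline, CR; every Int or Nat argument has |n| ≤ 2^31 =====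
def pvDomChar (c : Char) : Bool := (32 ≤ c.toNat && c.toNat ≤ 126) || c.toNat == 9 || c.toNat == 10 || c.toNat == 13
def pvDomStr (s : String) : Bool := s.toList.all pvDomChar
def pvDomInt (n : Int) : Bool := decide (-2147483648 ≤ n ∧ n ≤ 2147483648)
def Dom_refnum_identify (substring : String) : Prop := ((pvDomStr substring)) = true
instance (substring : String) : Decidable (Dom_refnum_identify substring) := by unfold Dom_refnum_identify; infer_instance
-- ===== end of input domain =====

-- B replaces A's fused two-flag loop by a divide-and-conquer recursion over string halves (alternative decomposition, same cost).

-- ===== PORT A =====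
-- fold over the characters maintaining the (letter_present, number_present) pair
def refnum_identify (substring : String) : Bool :=
  let flags := substring.toList.foldl
    (fun (st : Bool × Bool) letter =>
      let st := if PySem.Str.isalpha letter then (true, st.2) else st
      let st := if PySem.Str.isdigit letter then (st.1, true) else st
      st)
    (false, false)
  if flags.1 && flags.2 then true else false

-- ===== PORT B =====
-- scan: split in half, recurse, merge (letter_seen, digit_seen) with or, cut off when both found
def refnumScan (l : List Char) : Bool × Bool :=
  if _h : l.length ≤ 1 then
    match l with
    | [] => (false, false)
    | c :: _ => (PySem.Str.isalpha c, PySem.Str.isdigit c)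
  else
    let mid := l.length / 2
    let p1 := refnumScan (l.take mid)
    if p1.1 && p1.2 then (true, true)
    else
      let p2 := refnumScan (l.drop mid)
      (p1.1 || p2.1, p1.2 || p2.2)
termination_by l.length
decreasing_by
  · simp; omega
  · simp; omega

def refnum_identify_alt (substring : String) : Bool :=
  let p := refnumScan substring.toList
  p.1 && p.2

-- ===== PRECONDITION & SPEC =====
def Spec_refnum_identify (substring : String) (out : Bool) : Prop := out = refnum_identify_alt substring
instance (substring : String) (out : Bool) : Decidable (Spec_refnum_identify substring out) := by unfold Spec_refnum_identify; infer_instance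

-- ===== CLAIM (what is proved, stated in full; the proofs are below) =====
def Claim_equal_refnum_identify : Prop := ∀ (substring : String), Dom_refnum_identify substring → Spec_refnum_identify substring (refnum_identify substring)

-- ===== LEMMAS AND PROOFS =====

theorem refnum_flags_eq (l : List Char) (a b : Bool) :
    l.foldl
      (fun (st : Bool × Bool) letter =>
        let st := if PySem.Str.isalpha letter then (true, st.2) else st
        let st := if PySem.Str.isdigit letter then (st.1, true) else st
        st)
      (a, b)
    = (a || l.any PySem.Str.isalpha, b || l.any PySem.Str.isdigit) := by
  induction l generalizing a b with
  | nil => simp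
  | cons c t ih =>
    simp only [List.foldl_cons, List.any_cons]
    by_cases h1 : PySem.Str.isalpha c <;> by_cases h2 : PySem.Str.isdigit c <;>
      simp [h1, h2, ih]

-- the divide-and-conquer scan computes exactly the pair of existential scans
theorem refnumScan_eq (l : List Char) :
    refnumScan l = (l.any PySem.Str.isalpha, l.any PySem.Str.isdigit) := by
  generalize hn : l.length = n
  induction n using Nat.strong_induction_on generalizing l with
  | _ n ih =>
    subst hn
    rcases l with _ | ⟨c, _ | ⟨d, t⟩⟩
    · simp [refnumScan]
    · simp [refnumScan]
    · rw [refnumScan]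
      have h : ¬ (c :: d :: t).length ≤ 1 := by simp
      rw [dif_neg h]
      set l := c :: d :: t with hl
      set m := l.length / 2 with hm
      have hlen : 2 ≤ l.length := by simp [hl]
      have ht := ih (l.take m).length (by simp [hm]; omega) _ rfl
      have hd := ih (l.drop m).length (by simp [hm]; omega) _ rfl
      have e : ∀ f : Char → Bool, l.any f = ((l.take m).any f || (l.drop m).any f) := by
        intro f
        rw [← List.any_append, List.take_append_drop]
      simp only [ht, hd, e]
      split_ifs with hb
      · simp only [Bool.and_eq_true] at hb
        simp [hb.1, hb.2]
      · rfl

-- ===== VERDICT (by name: the statement is the Claim_ definition above) =====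
theorem refnum_identify_spec : Claim_equal_refnum_identify := by
  intro s _
  show refnum_identify s = refnum_identify_alt s
  unfold refnum_identify refnum_identify_alt
  rw [refnum_flags_eq, refnumScan_eq]
  cases s.toList.any PySem.Str.isalpha <;> cases s.toList.any PySem.Str.isdigit <;> rfl
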